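-- pv_equiv track=rewrite | github.com/TerosTechnology/vscode-terosHDL | resources/project_manager/generate_html.py | get_select_tool_options
-- ===== SOURCE A (Python) =====
-- def get_select_tool_options(doc):
--     options_framework = []
--     options_tool = []
--     options_simulator = []
--     options_linter = []
--     for tabname in doc:
--         tab_type = doc[tabname]['type']
--         if (tab_type == 'framework'):
--             options_framework.append(tabname)
--         elif (tab_type == 'tool'):
--             options_tool.append(tabname)
--         elif (tab_type == 'simulator'):
--             options_simulator.append(tabname)
--         elif (tab_type == 'linter'):
--             options_linter.append(tabname)
--     return options_framework, options_tool, options_simulator, options_linter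
-- ===== SOURCE B (Python) =====
-- def get_select_tool_options(doc):
--     options_framework = [t for t in doc if doc[t]['type'] == 'framework']
--     options_tool = [t for t in doc if doc[t]['type'] == 'tool']
--     options_simulator = [t for t in doc if doc[t]['type'] == 'simulator']
--     options_linter = [t for t in doc if doc[t]['type'] == 'linter']
--     return options_framework, options_tool, options_simulator, options_linter
-- ===== Notes on version B (the rewrite author's own statement) =====
-- stated objective: idiomatic
-- what changed: The single dispatch loop with four mutable accumulators is replaced by four independent list comprehensions, one filtering pass per type.
import Mathlib
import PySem

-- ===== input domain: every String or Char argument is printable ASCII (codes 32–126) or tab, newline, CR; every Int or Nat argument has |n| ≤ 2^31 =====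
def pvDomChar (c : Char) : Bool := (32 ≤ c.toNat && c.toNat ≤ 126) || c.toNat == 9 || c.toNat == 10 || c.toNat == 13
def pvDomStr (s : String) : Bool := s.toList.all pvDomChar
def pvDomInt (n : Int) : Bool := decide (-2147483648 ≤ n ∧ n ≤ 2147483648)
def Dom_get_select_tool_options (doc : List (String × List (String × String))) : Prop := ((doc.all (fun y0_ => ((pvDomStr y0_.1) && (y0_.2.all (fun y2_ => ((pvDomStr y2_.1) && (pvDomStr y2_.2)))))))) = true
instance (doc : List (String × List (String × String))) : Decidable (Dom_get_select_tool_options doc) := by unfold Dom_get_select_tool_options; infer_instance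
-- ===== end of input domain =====

-- B replaces A's single dispatch loop with four independent filtering comprehensions (idiomatic, same cost).

-- ===== PORT A =====
-- doc[tabname]['type'] : first-match lookup of the key "type"; Pre_ guarantees it exists (otherwise Python raises KeyError)
def pvTabType (attrs : List (String × String)) : String := (attrs.lookup "type").getD ""

def get_select_tool_options (doc : List (String × List (String × String))) : List String × List String × List String × List String :=
  doc.foldl (fun acc p =>
    let tab_type := pvTabType p.2
    if tab_type = "framework" then (acc.1 ++ [p.1], acc.2.1, acc.2.2.1, acc.2.2.2)
    else if tab_type = "tool" then (acc.1, acc.2.1 ++ [p.1], acc.2.2.1, acc.2.2.2)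
    else if tab_type = "simulator" then (acc.1, acc.2.1, acc.2.2.1 ++ [p.1], acc.2.2.2)
    else if tab_type = "linter" then (acc.1, acc.2.1, acc.2.2.1, acc.2.2.2 ++ [p.1])
    else acc) ([], [], [], [])

-- ===== PORT B =====
def pvSelect (doc : List (String × List (String × String))) (ty : String) : List String :=
  (doc.filter (fun p => pvTabType p.2 = ty)).map (·.1)

def get_select_tool_options_alt (doc : List (String × List (String × String))) : List String × List String × List String × List String :=
  (pvSelect doc "framework", pvSelect doc "tool", pvSelect doc "simulator", pvSelect doc "linter")

-- ===== PRECONDITION & SPEC =====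
-- Pre_ excludes docs where some tab's attribute dict lacks the key "type": there Python A (and B) raise KeyError.
def Pre_get_select_tool_options (doc : List (String × List (String × String))) : Prop :=
  ∀ p ∈ doc, (p.2.lookup "type").isSome

instance (doc : List (String × List (String × String))) : Decidable (Pre_get_select_tool_options doc) := by
  unfold Pre_get_select_tool_options; infer_instance

def pvWitness_get_select_tool_options : (List (String × List (String × String))) :=
  [("a", [("type", "tool")]), ("b", [("type", "linter")])]

def Spec_get_select_tool_options (doc : List (String × List (String × String))) (out : List String × List String × List String × List String) : Prop := out = get_select_tool_options_alt doc
instance (doc : List (String × List (String × String))) (out : List String × List String × List String × List String) : Decidable (Spec_get_select_tool_options doc out) := by unfold Spec_get_select_tool_options; infer_instance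

-- ===== CLAIM (what is proved, stated in full; the proofs are below) =====
def Claim_equal_get_select_tool_options : Prop := ∀ (doc : List (String × List (String × String))), Dom_get_select_tool_options doc → Pre_get_select_tool_options doc → Spec_get_select_tool_options doc (get_select_tool_options doc)

-- ===== LEMMAS AND PROOFS =====

theorem foldl_select (doc : List (String × List (String × String)))
    (a b c d : List String) :
    doc.foldl (fun acc p =>
      let tab_type := pvTabType p.2
      if tab_type = "framework" then (acc.1 ++ [p.1], acc.2.1, acc.2.2.1, acc.2.2.2)
      else if tab_type = "tool" then (acc.1, acc.2.1 ++ [p.1], acc.2.2.1, acc.2.2.2)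
      else if tab_type = "simulator" then (acc.1, acc.2.1, acc.2.2.1 ++ [p.1], acc.2.2.2)
      else if tab_type = "linter" then (acc.1, acc.2.1, acc.2.2.1, acc.2.2.2 ++ [p.1])
      else acc) (a, b, c, d)
    = (a ++ pvSelect doc "framework", b ++ pvSelect doc "tool",
       c ++ pvSelect doc "simulator", d ++ pvSelect doc "linter") := by
  induction doc generalizing a b c d with
  | nil => simp [pvSelect]
  | cons p rest ih =>
    simp only [List.foldl_cons]
    by_cases h1 : pvTabType p.2 = "framework"
    · simp [h1, ih, pvSelect]
    · by_cases h2 : pvTabType p.2 = "tool"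
      · simp [h2, ih, pvSelect]
      · by_cases h3 : pvTabType p.2 = "simulator"
        · simp [h3, ih, pvSelect]
        · by_cases h4 : pvTabType p.2 = "linter"
          · simp [h4, ih, pvSelect]
          · simp [h1, h2, h3, h4, ih, pvSelect]

-- ===== VERDICT (by name: the statement is the Claim_ definition above) =====
theorem get_select_tool_options_spec : Claim_equal_get_select_tool_options := by
  intro doc _ _
  unfold Spec_get_select_tool_options get_select_tool_options get_select_tool_options_alt
  simp [foldl_select]
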